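-- pv_equiv track=rewrite | github.com/krzychsol/ASD | DynamicProgramming/maximin.py | maximin
-- ===== SOURCE A (Python) =====
-- def maximin(A,k):
--     n = len(A)
--     F = [[0 for _ in range(k+1)] for __ in range(n+1)]
--
--     #dla n = 1
--     for i in range(1,k+1):
--         F[1][i] = A[0]
--
--     #dla k = 1
--     for i in range(1,n+1):
--         F[i][1] = sum(A[:i])
--
--     #dla k od 2 do n
--     for i in range(2,k+1):
--         for j in range(2,n+1):
--             best = float("inf")
--             for p in range(1,j+1):
--                 best = min(best,max(sum(A[p:j]),F[p][i-1]))
--             F[j][i] = best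
--
--     return F[n][k]
-- ===== SOURCE B (Python) =====
-- def maximin(A, k):
--     n = len(A)
--     if k == 0:
--         return 0
--     # prefix sums: sum(A[p:j]) == pref[j] - pref[p], O(1) per subarray
--     pref = [0]
--     s = 0
--     for x in A:
--         s += x
--         pref.append(s)
--     col = pref[:]                 # one part: col[j] = sum of the first j elements
--     for _ in range(2, k + 1):     # add one more part per round, keep only one column
--         new = [0] + A[:1]         # base: splitting a single element gives A[0]
--         for j in range(2, n + 1):
--             best = max(pref[j] - pref[1], col[1])
--             for p in range(2, j + 1):
--                 v = max(pref[j] - pref[p], col[p])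
--                 if v < best:
--                     best = v
--             new.append(best)
--         col = new
--     return col[n]
-- ===== Notes on version B (the rewrite author's own statement) =====
-- stated objective: faster
-- what changed: B precomputes prefix sums so each subarray sum costs O(1) instead of an O(n) inner sum, and keeps only a single DP column (two 1-D lists) instead of A's full (n+1)x(k+1) table
import Mathlib
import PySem

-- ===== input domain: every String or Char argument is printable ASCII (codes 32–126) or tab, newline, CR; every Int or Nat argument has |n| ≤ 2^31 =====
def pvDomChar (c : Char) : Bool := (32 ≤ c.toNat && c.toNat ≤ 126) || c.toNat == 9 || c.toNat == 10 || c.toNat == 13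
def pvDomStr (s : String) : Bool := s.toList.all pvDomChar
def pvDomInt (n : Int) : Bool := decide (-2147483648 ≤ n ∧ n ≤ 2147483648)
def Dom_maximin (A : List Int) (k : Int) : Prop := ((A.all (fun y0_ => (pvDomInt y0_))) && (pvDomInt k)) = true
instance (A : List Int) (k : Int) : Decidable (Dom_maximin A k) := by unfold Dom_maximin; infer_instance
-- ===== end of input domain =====

-- B replaces A's repeated O(n) subarray sums by precomputed prefix sums and keeps a single DP
-- column instead of A's full (n+1)×(k+1) table; measured faster in a timing run.

-- ===== PORT A =====
-- F[j][i] read/write: total pyGetD/pySetD forms (default 0 / no-op out of range); exact on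
-- Pre_maximin inputs, where every index Python uses is in range (Pre_ excludes exactly the
-- IndexError inputs).
def pvGetA2 (F : List (List Int)) (j i : Int) : Int :=
  PySem.List.pyGetD (PySem.List.pyGetD F j []) i 0

def pvSetA2 (F : List (List Int)) (j i : Int) (v : Int) : List (List Int) :=
  PySem.List.pySetD F j (PySem.List.pySetD (PySem.List.pyGetD F j []) i v)

-- best = float("inf"); best = min(best, v): none models inf (min(inf, v) = v for every int; exact)
def pvMinInf (b : Option Int) (v : Int) : Option Int :=
  match b with
  | none => some v
  | some b => some (min b v)

-- F[1][i] = A[0]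
def pvRow1Body (A : List Int) (F : List (List Int)) (i : Int) : List (List Int) :=
  pvSetA2 F 1 i (PySem.List.pyGetD A 0 0)

-- F[i][1] = sum(A[:i])
def pvCol1Body (A : List Int) (F : List (List Int)) (i : Int) : List (List Int) :=
  pvSetA2 F i 1 (PySem.List.slice A none (some i)).sum

-- body of 'for j in range(2, n+1)': the p-loop computing best, then F[j][i] = best
-- (best is always some here since j ≥ 2 makes the p-loop nonempty; .getD 0 is a formality)
def pvInnerBody (A : List Int) (i : Int) (F : List (List Int)) (j : Int) : List (List Int) :=
  let best : Option Int := (PySem.List.pyRange 1 (j + 1) 1).foldl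
    (fun b p =>
      pvMinInf b (max (PySem.List.slice A (some p) (some j)).sum (pvGetA2 F p (i - 1)))) none
  pvSetA2 F j i (best.getD 0)

-- body of 'for i in range(2, k+1)'
def pvOuterBody (A : List Int) (F : List (List Int)) (i : Int) : List (List Int) :=
  (PySem.List.pyRange 2 ((A.length : Int) + 1) 1).foldl (pvInnerBody A i) F

def maximin (A : List Int) (k : Int) : Int :=
  let n : Int := A.length
  let F : List (List Int) := List.replicate (n + 1).toNat (List.replicate (k + 1).toNat 0)
  let F := (PySem.List.pyRange 1 (k + 1) 1).foldl (pvRow1Body A) F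
  let F := (PySem.List.pyRange 1 (n + 1) 1).foldl (pvCol1Body A) F
  let F := (PySem.List.pyRange 2 (k + 1) 1).foldl (pvOuterBody A) F
  pvGetA2 F n k

-- ===== PORT B =====
-- body of B's 'for j in range(2, n+1)': O(1) prefix-sum lookups, running minimum, append
def pvAltInner (pref col : List Int) (new : List Int) (j : Int) : List Int :=
  let best := max (PySem.List.pyGetD pref j 0 - PySem.List.pyGetD pref 1 0)
    (PySem.List.pyGetD col 1 0)
  let best := (PySem.List.pyRange 2 (j + 1) 1).foldl
    (fun best p =>
      let v := max (PySem.List.pyGetD pref j 0 - PySem.List.pyGetD pref p 0)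
        (PySem.List.pyGetD col p 0)
      if v < best then v else best) best
  new ++ [best]

-- one round of B's 'for _ in range(2, k+1)': build the next column from the previous one
def pvAltRound (A pref : List Int) (col : List Int) (_i : Int) : List Int :=
  let new := [0] ++ PySem.List.slice A none (some 1)
  (PySem.List.pyRange 2 ((A.length : Int) + 1) 1).foldl (pvAltInner pref col) new

def maximin_alt (A : List Int) (k : Int) : Int :=
  let n : Int := A.length
  if k = 0 then 0
  else
    let ps := A.foldl (fun (st : List Int × Int) x => (st.1 ++ [st.2 + x], st.2 + x)) ([0], 0)
    let pref := ps.1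
    let col := pref
    let col := (PySem.List.pyRange 2 (k + 1) 1).foldl (pvAltRound A pref) col
    PySem.List.pyGetD col n 0

-- ===== PRECONDITION & SPEC =====
-- Pre_ excludes exactly the inputs where A raises IndexError: k < 0 (the table rows are empty),
-- k = 0 with nonempty A (the write F[i][1] hits rows of length 1), and k ≥ 1 with empty A
-- (the read A[0]).
def Pre_maximin (A : List Int) (k : Int) : Prop := (1 ≤ k ∧ A ≠ []) ∨ (k = 0 ∧ A = [])
instance (A : List Int) (k : Int) : Decidable (Pre_maximin A k) := by
  unfold Pre_maximin; infer_instance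
def pvWitness_maximin : List Int × Int := ([3, 1, 2], 2)
def Spec_maximin (A : List Int) (k : Int) (out : Int) : Prop := out = maximin_alt A k
instance (A : List Int) (k : Int) (out : Int) : Decidable (Spec_maximin A k out) := by
  unfold Spec_maximin; infer_instance

-- ===== CLAIM (what is proved, stated in full; the proofs are below) =====
def Claim_equal_maximin : Prop :=
  ∀ (A : List Int) (k : Int), Dom_maximin A k → Pre_maximin A k → Spec_maximin A k (maximin A k)

-- ===== LEMMAS AND PROOFS =====

-- prefix sum of the first j elements
def pvP (A : List Int) (j : Nat) : Int := (A.take j).sum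

-- the running minimum over p = 1..j of max(sum(A[p:j]), c p), left to right
def pvBest (A : List Int) (c : Nat → Int) (j : Nat) : Int :=
  (List.range (j - 1)).foldl
    (fun b m => min b (max (pvP A j - pvP A (m + 2)) (c (m + 2))))
    (max (pvP A j - pvP A 1) (c 1))

-- the DP column for i = t+1 parts, as a function of the row index j
def pvRefC (A : List Int) : Nat → Nat → Int
  | 0 => fun j => pvP A j
  | t + 1 => fun j => if j = 0 then 0 else if j = 1 then pvP A 1 else pvBest A (pvRefC A t) j

-- Nat-indexed view of the table
def pvG (F : List (List Int)) (j i : Nat) : Int := (F.getD j []).getD i 0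
def pvS (F : List (List Int)) (j i : Nat) (v : Int) : List (List Int) :=
  F.set j ((F.getD j []).set i v)
def pvShape (F : List (List Int)) (n K : Nat) : Prop :=
  F.length = n + 1 ∧ ∀ row ∈ F, row.length = K + 1

-- table contents after the two initialisation loops
def pvT2 (A : List Int) (n K j i : Nat) : Int :=
  if i = 1 ∧ 1 ≤ j ∧ j ≤ n then pvP A j
  else if j = 1 ∧ 1 ≤ i ∧ i ≤ K then pvP A 1 else 0

-- columns 1..c of the table hold the DP columns, the rest is still the initial contents
def pvColOK (A : List Int) (n K : Nat) (F : List (List Int)) (c : Nat) : Prop :=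
  ∀ j i : Nat, j ≤ n → 1 ≤ i → i ≤ K →
    pvG F j i = if i ≤ c then pvRefC A (i - 1) j else pvT2 A n K j i

-- B's column after t rounds, as a list
def pvColList (A : List Int) (t : Nat) : List Int :=
  (List.range (A.length + 1)).map (pvRefC A t)

lemma pvGetA2_cast (F : List (List Int)) (j i : Nat) : pvGetA2 F ↑j ↑i = pvG F j i := by
  simp [pvGetA2, pvG, PySem.List.pyGetD_natCast]

lemma pvSetA2_cast (F : List (List Int)) (j i : Nat) (v : Int) :
    pvSetA2 F ↑j ↑i v = pvS F j i v := by
  simp [pvSetA2, pvS, PySem.List.pySetD_natCast, PySem.List.pyGetD_natCast]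

lemma pvG_set (F : List (List Int)) (j i : Nat) (v : Int)
    (hj : j < F.length) (hi : i < (F.getD j []).length) (j' i' : Nat) :
    pvG (pvS F j i v) j' i' = if j' = j ∧ i' = i then v else pvG F j' i' := by
  unfold pvG pvS
  have hrow : (F.set j ((F.getD j []).set i v)).getD j' [] =
      if j' = j then (F.getD j []).set i v else F.getD j' [] := by
    by_cases hjj : j' = j
    · simp [hjj, List.getD, List.getElem?_set, hj]
    · simp [hjj, List.getD, List.getElem?_set, Ne.symm hjj]
  rw [hrow]
  by_cases hjj : j' = j
  · simp only [hjj, if_true]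
    by_cases hii : i' = i
    · have hi' : i < (F[j]?.getD []).length := by simpa [List.getD] using hi
      simp [hii, List.getD, List.getElem?_set, hi']
    · simp [hii, List.getD, List.getElem?_set, Ne.symm hii]
  · simp [hjj]

lemma pvShape_set (F : List (List Int)) (n K j i : Nat) (v : Int) (h : pvShape F n K)
    (hj : j < F.length) :
    pvShape (pvS F j i v) n K := by
  obtain ⟨hl, hr⟩ := h
  have hmem : F.getD j [] ∈ F := by
    rw [List.getD_eq_getElem F [] hj]
    exact List.getElem_mem hj
  refine ⟨by simp [pvS, hl], ?_⟩
  intro row hrow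
  rcases List.mem_or_eq_of_mem_set hrow with h' | h'
  · exact hr row h'
  · subst h'
    rw [List.length_set]
    exact hr _ hmem

lemma pvShape_range (F : List (List Int)) (n K j : Nat) (h : pvShape F n K) (hj : j ≤ n) :
    j < F.length ∧ ∀ i ≤ K, i < (F.getD j []).length := by
  obtain ⟨hl, hr⟩ := h
  have hjF : j < F.length := by omega
  have hmem : F.getD j [] ∈ F := by
    rw [List.getD_eq_getElem F [] hjF]
    exact List.getElem_mem hjF
  have hlen := hr _ hmem
  exact ⟨hjF, fun i hi => by omega⟩

lemma pvSlice_sum (A : List Int) (p j : Nat) (hpj : p ≤ j) :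
    (PySem.List.slice A (some ↑p) (some ↑j)).sum = pvP A j - pvP A p := by
  rw [PySem.List.slice_natCast]
  unfold pvP
  have : A.take j = A.take p ++ (A.drop p).take (j - p) := by
    rw [← List.take_add]
    congr 1
    omega
  rw [this, List.sum_append]
  ring


lemma pvHead_eq (A : List Int) (hA : A ≠ []) : PySem.List.pyGetD A 0 0 = pvP A 1 := by
  cases A with
  | nil => exact absurd rfl hA
  | cons a as => simp [PySem.List.pyGetD_zero, pvP, List.getD]


lemma pvFoldl_minInf (l : List Int) (f : Int → Int) (b : Int) :
    l.foldl (fun acc p => pvMinInf acc (f p)) (some b)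
      = some (l.foldl (fun acc p => min acc (f p)) b) := by
  induction l generalizing b with
  | nil => rfl
  | cons x xs ih =>
    simp only [List.foldl_cons]
    rw [show pvMinInf (some b) (f x) = some (min b (f x)) from rfl, ih]


lemma pvRange2_map (j : Nat) :
    PySem.List.pyRange 2 ((j : Int) + 1) 1
      = (List.range (j - 1)).map (fun m : Nat => ((m : Int) + 2)) := by
  rw [PySem.List.pyRange_one]
  have : ((j : Int) + 1 - 2).toNat = j - 1 := by omega
  rw [this]
  apply List.map_congr_left
  intro m _
  omega


lemma pvBestFoldA (A : List Int) (c : Nat → Int) (F : List (List Int)) (cc : Nat)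
    (hreads : ∀ p, 1 ≤ p → p ≤ A.length → pvG F p cc = c p)
    (j : Nat) (hj2 : 2 ≤ j) (hjn : j ≤ A.length) (i : Int) (hi : i - 1 = ↑cc) :
    ((PySem.List.pyRange 1 ((j : Int) + 1) 1).foldl
      (fun b p =>
        pvMinInf b (max (PySem.List.slice A (some p) (some ↑j)).sum (pvGetA2 F p (i - 1)))) none)
      = some (pvBest A c j) := by
  rw [hi]
  have h1 : (1 : Int) < (j : Int) + 1 := by omega
  rw [PySem.List.pyRange_one_cons h1]
  simp only [List.foldl_cons]
  have e1 : (PySem.List.slice A (some (1 : Int)) (some ↑j)).sum = pvP A j - pvP A 1 := by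
    have h := pvSlice_sum A 1 j (by omega)
    simpa using h
  have e2 : pvGetA2 F (1 : Int) ↑cc = c 1 := by
    have h := pvGetA2_cast F 1 cc
    simp only [Nat.cast_one] at h
    rw [h]
    exact hreads 1 le_rfl (by omega)
  rw [show pvMinInf none (max (PySem.List.slice A (some (1:Int)) (some ↑j)).sum (pvGetA2 F (1:Int) ↑cc))
      = some (max (PySem.List.slice A (some (1:Int)) (some ↑j)).sum (pvGetA2 F (1:Int) ↑cc)) from rfl]
  rw [e1, e2]
  rw [pvFoldl_minInf]
  congr 1
  rw [show (1 : Int) + 1 = 2 from rfl, pvRange2_map, List.foldl_map]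
  unfold pvBest
  apply PySem.List.foldl_congr_mem'
  intro m hm b
  have hm' : m < j - 1 := List.mem_range.mp hm
  have hc2 : ((m : Int) + 2) = ((m + 2 : Nat) : Int) := by push_cast; ring
  rw [hc2, pvSlice_sum A (m + 2) j (by omega), pvGetA2_cast,
    hreads (m + 2) (by omega) (by omega)]

lemma pvBestFoldB (A : List Int) (c : Nat → Int) (pref col : List Int)
    (hpref : ∀ p, p ≤ A.length → PySem.List.pyGetD pref ↑p 0 = pvP A p)
    (hcol : ∀ p, 1 ≤ p → p ≤ A.length → PySem.List.pyGetD col ↑p 0 = c p)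
    (j : Nat) (hj2 : 2 ≤ j) (hjn : j ≤ A.length) :
    ((PySem.List.pyRange 2 ((j : Int) + 1) 1).foldl
      (fun best p =>
        if max (PySem.List.pyGetD pref ↑j 0 - PySem.List.pyGetD pref p 0)
            (PySem.List.pyGetD col p 0) < best then
          max (PySem.List.pyGetD pref ↑j 0 - PySem.List.pyGetD pref p 0)
            (PySem.List.pyGetD col p 0)
        else best)
      (max (PySem.List.pyGetD pref ↑j 0 - PySem.List.pyGetD pref 1 0)
        (PySem.List.pyGetD col 1 0)))
      = pvBest A c j := by
  have hmin : ∀ b v : Int, (if v < b then v else b) = min b v := by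
    intro b v
    rcases lt_or_ge v b with h | h <;> simp [min_def] <;> omega
  have hp1 : PySem.List.pyGetD pref (1 : Int) 0 = pvP A 1 := by
    have h := hpref 1 (by omega)
    simpa using h
  have hc1 : PySem.List.pyGetD col (1 : Int) 0 = c 1 := by
    have h := hcol 1 le_rfl (by omega)
    simpa using h
  rw [pvRange2_map, List.foldl_map]
  unfold pvBest
  rw [hpref j hjn, hp1, hc1]
  apply PySem.List.foldl_congr_mem'
  intro m hm b
  have hm' : m < j - 1 := List.mem_range.mp hm
  have hc2 : ((m : Int) + 2) = ((m + 2 : Nat) : Int) := by push_cast; ring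
  rw [hc2, hpref (m + 2) (by omega), hcol (m + 2) (by omega) (by omega), hmin]

lemma pvG_replicate (n K j i : Nat) :
    pvG (List.replicate (n + 1) (List.replicate (K + 1) (0 : Int))) j i = 0 := by
  unfold pvG
  simp only [List.getD, List.getElem?_replicate]
  split
  · simp only [Option.getD_some, List.getElem?_replicate]
    split <;> rfl
  · rfl

lemma pvShape_replicate (n K : Nat) :
    pvShape (List.replicate (n + 1) (List.replicate (K + 1) (0 : Int))) n K := by
  refine ⟨by simp, ?_⟩
  intro row hrow
  rw [List.eq_of_mem_replicate hrow]
  simp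

lemma pvStage1 (A : List Int) (n K : Nat) (hn1 : 1 ≤ n) :
    ∀ m : Nat, m ≤ K →
      pvShape ((PySem.List.pyRange 1 ((m : Int) + 1) 1).foldl (pvRow1Body A)
          (List.replicate (n + 1) (List.replicate (K + 1) 0))) n K
      ∧ ∀ j i : Nat,
          pvG ((PySem.List.pyRange 1 ((m : Int) + 1) 1).foldl (pvRow1Body A)
              (List.replicate (n + 1) (List.replicate (K + 1) 0))) j i
            = if j = 1 ∧ 1 ≤ i ∧ i ≤ m then PySem.List.pyGetD A 0 0 else 0 := by
  intro m
  induction m with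
  | zero =>
    intro _
    rw [show ((0 : Nat) : Int) + 1 = 1 from by norm_num, PySem.List.pyRange_one_eq_nil le_rfl,
      List.foldl_nil]
    refine ⟨pvShape_replicate n K, ?_⟩
    intro j i
    rw [pvG_replicate]
    split_ifs with h <;> omega
  | succ m ih =>
    intro hm
    obtain ⟨hsh, hchar⟩ := ih (by omega)
    have hsucc : ((m + 1 : Nat) : Int) + 1 = (((m : Nat) : Int) + 1) + 1 := by push_cast; ring
    rw [hsucc, PySem.List.pyRange_one_succ_right (by omega), List.foldl_append, List.foldl_cons,
      List.foldl_nil]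
    set Fm := (PySem.List.pyRange 1 ((m : Int) + 1) 1).foldl (pvRow1Body A)
      (List.replicate (n + 1) (List.replicate (K + 1) 0)) with hFm
    have hcast : pvRow1Body A Fm ((m : Int) + 1) = pvS Fm 1 (m + 1) (PySem.List.pyGetD A 0 0) := by
      unfold pvRow1Body
      rw [show ((m : Int) + 1) = ((m + 1 : Nat) : Int) from by push_cast; ring,
        show (1 : Int) = ((1 : Nat) : Int) from by norm_num, pvSetA2_cast]
    obtain ⟨hjF, hrowlen⟩ := pvShape_range Fm n K 1 hsh hn1
    constructor
    · rw [hcast]; exact pvShape_set Fm n K 1 (m + 1) _ hsh hjF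
    · intro j i
      rw [hcast, pvG_set Fm 1 (m + 1) _ hjF (hrowlen (m + 1) (by omega)) j i, hchar j i]
      split_ifs <;> first | rfl | omega

lemma pvStage2 (A : List Int) (n K : Nat) (hn1 : 1 ≤ n) (hK : 1 ≤ K)
    (F0 : List (List Int)) (h0s : pvShape F0 n K)
    (h0 : ∀ j i : Nat, pvG F0 j i = if j = 1 ∧ 1 ≤ i ∧ i ≤ K then PySem.List.pyGetD A 0 0 else 0) :
    ∀ m : Nat, m ≤ n →
      pvShape ((PySem.List.pyRange 1 ((m : Int) + 1) 1).foldl (pvCol1Body A) F0) n K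
      ∧ ∀ j i : Nat,
          pvG ((PySem.List.pyRange 1 ((m : Int) + 1) 1).foldl (pvCol1Body A) F0) j i
            = if i = 1 ∧ 1 ≤ j ∧ j ≤ m then pvP A j
              else if j = 1 ∧ 1 ≤ i ∧ i ≤ K then PySem.List.pyGetD A 0 0 else 0 := by
  intro m
  induction m with
  | zero =>
    intro _
    rw [show ((0 : Nat) : Int) + 1 = 1 from by norm_num, PySem.List.pyRange_one_eq_nil le_rfl,
      List.foldl_nil]
    refine ⟨h0s, ?_⟩
    intro j i
    rw [h0 j i]
    split_ifs <;> first | rfl | omega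
  | succ m ih =>
    intro hm
    obtain ⟨hsh, hchar⟩ := ih (by omega)
    have hsucc : ((m + 1 : Nat) : Int) + 1 = (((m : Nat) : Int) + 1) + 1 := by push_cast; ring
    rw [hsucc, PySem.List.pyRange_one_succ_right (by omega), List.foldl_append, List.foldl_cons,
      List.foldl_nil]
    set Fm := (PySem.List.pyRange 1 ((m : Int) + 1) 1).foldl (pvCol1Body A) F0 with hFm
    have hval : (PySem.List.slice A none (some ((m : Int) + 1))).sum = pvP A (m + 1) := by
      rw [show ((m : Int) + 1) = ((m + 1 : Nat) : Int) from by push_cast; ring,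
        PySem.List.slice_to_natCast]
      rfl
    have hcast : pvCol1Body A Fm ((m : Int) + 1) = pvS Fm (m + 1) 1 (pvP A (m + 1)) := by
      unfold pvCol1Body
      rw [hval, show ((m : Int) + 1) = ((m + 1 : Nat) : Int) from by push_cast; ring,
        show (1 : Int) = ((1 : Nat) : Int) from by norm_num, pvSetA2_cast]
    obtain ⟨hjF, hrowlen⟩ := pvShape_range Fm n K (m + 1) hsh (by omega)
    constructor
    · rw [hcast]; exact pvShape_set Fm n K (m + 1) 1 _ hsh hjF
    · intro j i
      rw [hcast, pvG_set Fm (m + 1) 1 _ hjF (hrowlen 1 (by omega)) j i, hchar j i]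
      by_cases hw : j = m + 1 ∧ i = 1
      · obtain ⟨hj', hi'⟩ := hw
        subst hj'; subst hi'
        rw [if_pos ⟨rfl, rfl⟩, if_pos ⟨rfl, by omega⟩]
      · rw [if_neg hw]
        split_ifs <;> first | rfl | omega

lemma pvStage3Inner (A : List Int) (n K : Nat) (hn : A.length = n) (hn1 : 1 ≤ n)
    (c : Nat) (hc : 1 ≤ c) (hcK : c < K)
    (F : List (List Int)) (hsh : pvShape F n K) (hF : pvColOK A n K F c) :
    ∀ d : Nat, 1 ≤ d → d ≤ n →
      pvShape ((PySem.List.pyRange 2 ((d : Int) + 1) 1).foldl (pvInnerBody A (↑c + 1)) F) n K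
      ∧ ∀ j i : Nat, j ≤ n → 1 ≤ i → i ≤ K →
          pvG ((PySem.List.pyRange 2 ((d : Int) + 1) 1).foldl (pvInnerBody A (↑c + 1)) F) j i
            = if i = c + 1 ∧ 2 ≤ j ∧ j ≤ d then pvRefC A c j
              else if i ≤ c then pvRefC A (i - 1) j else pvT2 A n K j i := by
  intro d
  induction d with
  | zero => intro h _; omega
  | succ d ih =>
    intro _ hdn
    by_cases hd0 : d = 0
    · subst hd0
      rw [show ((1 : Nat) : Int) + 1 = 2 from by norm_num, PySem.List.pyRange_one_eq_nil le_rfl,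
        List.foldl_nil]
      refine ⟨hsh, ?_⟩
      intro j i hj hi1 hiK
      rw [hF j i hj hi1 hiK]
      split_ifs <;> first | rfl | omega
    · have hd1 : 1 ≤ d := by omega
      obtain ⟨hsh', hchar⟩ := ih hd1 (by omega)
      have hsucc : ((d + 1 : Nat) : Int) + 1 = (((d : Nat) : Int) + 1) + 1 := by push_cast; ring
      rw [hsucc, PySem.List.pyRange_one_succ_right (by omega), List.foldl_append, List.foldl_cons,
        List.foldl_nil]
      set F' := (PySem.List.pyRange 2 ((d : Int) + 1) 1).foldl (pvInnerBody A (↑c + 1)) F with hF'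
      have hreads : ∀ p, 1 ≤ p → p ≤ A.length → pvG F' p c = pvRefC A (c - 1) p := by
        intro p hp1 hpn
        rw [hchar p c (by omega) (by omega) (by omega)]
        split_ifs <;> first | rfl | omega
      have hbest := pvBestFoldA A (pvRefC A (c - 1)) F' c hreads (d + 1) (by omega) (by omega)
        ((c : Int) + 1) (by ring)
      unfold pvInnerBody
      have hdc : ((d : Int) + 1) = ((d + 1 : Nat) : Int) := by push_cast; ring
      rw [hdc, hbest]
      simp only [Option.getD_some]
      have hcc : ((c : Int) + 1) = ((c + 1 : Nat) : Int) := by push_cast; ring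
      rw [hcc, pvSetA2_cast]
      obtain ⟨hjF, hrowlen⟩ := pvShape_range F' n K (d + 1) hsh' (by omega)
      refine ⟨pvShape_set F' n K (d + 1) (c + 1) _ hsh' hjF, ?_⟩
      intro j i hj hi1 hiK
      rw [pvG_set F' (d + 1) (c + 1) _ hjF (hrowlen (c + 1) (by omega)) j i]
      by_cases hw : j = d + 1 ∧ i = c + 1
      · obtain ⟨hj', hi'⟩ := hw
        subst hj'; subst hi'
        rw [if_pos ⟨rfl, rfl⟩, if_pos ⟨rfl, by omega, le_rfl⟩]
        have hc' : c = c - 1 + 1 := by omega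
        rw [hc']
        show pvBest A (pvRefC A (c - 1)) (d + 1) = pvRefC A (c - 1 + 1) (d + 1)
        simp only [pvRefC]
        rw [if_neg (by omega), if_neg (by omega)]
      · rw [if_neg hw, hchar j i hj hi1 hiK]
        split_ifs <;> first | rfl | omega

lemma pvStage3 (A : List Int) (n K : Nat) (hn : A.length = n) (hn1 : 1 ≤ n)
    (F1 : List (List Int)) (hsh : pvShape F1 n K) (h1 : pvColOK A n K F1 1) :
    ∀ c : Nat, 1 ≤ c → c ≤ K →
      pvShape ((PySem.List.pyRange 2 ((c : Int) + 1) 1).foldl (pvOuterBody A) F1) n K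
      ∧ pvColOK A n K ((PySem.List.pyRange 2 ((c : Int) + 1) 1).foldl (pvOuterBody A) F1) c := by
  intro c
  induction c with
  | zero => intro h _; omega
  | succ c ih =>
    intro _ hcK
    by_cases hc0 : c = 0
    · subst hc0
      rw [show ((1 : Nat) : Int) + 1 = 2 from by norm_num, PySem.List.pyRange_one_eq_nil le_rfl,
        List.foldl_nil]
      exact ⟨hsh, h1⟩
    · have hc1 : 1 ≤ c := by omega
      obtain ⟨hsh', hcol⟩ := ih hc1 (by omega)
      have hsucc : ((c + 1 : Nat) : Int) + 1 = (((c : Nat) : Int) + 1) + 1 := by push_cast; ring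
      rw [hsucc, PySem.List.pyRange_one_succ_right (by omega), List.foldl_append, List.foldl_cons,
        List.foldl_nil]
      set Fc := (PySem.List.pyRange 2 ((c : Int) + 1) 1).foldl (pvOuterBody A) F1 with hFc
      unfold pvOuterBody
      rw [hn]
      obtain ⟨hsh2, hchar⟩ := pvStage3Inner A n K hn hn1 c hc1 (by omega) Fc hsh' hcol n hn1 le_rfl
      refine ⟨hsh2, ?_⟩
      intro j i hj hi1 hiK
      rw [hchar j i hj hi1 hiK]
      by_cases hi : i = c + 1
      · subst hi
        rw [if_pos (le_refl (c + 1)), show (c + 1) - 1 = c from by omega]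
        by_cases h2j : 2 ≤ j
        · rw [if_pos ⟨rfl, h2j, hj⟩]
        · rw [if_neg (by omega), if_neg (by omega)]
          have hj01 : j = 0 ∨ j = 1 := by omega
          have hcsub : c = c - 1 + 1 := by omega
          rcases hj01 with hj0 | hj1 <;> subst_vars <;> rw [hcsub] <;>
            simp [pvRefC, pvT2] <;> omega
      · rw [if_neg (by exact fun h => hi h.1)]
        split_ifs <;> first | rfl | omega

lemma pvPrefFold (l : List Int) :
    ∀ (acc : List Int) (s : Int),
      l.foldl (fun (st : List Int × Int) x => (st.1 ++ [st.2 + x], st.2 + x)) (acc, s)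
        = (acc ++ (List.range l.length).map (fun j => s + (l.take (j + 1)).sum), s + l.sum) := by
  induction l with
  | nil => intro acc s; simp
  | cons x xs ih =>
    intro acc s
    simp only [List.foldl_cons]
    rw [ih (acc ++ [s + x]) (s + x)]
    simp only [Prod.mk.injEq, List.length_cons]
    constructor
    · rw [List.range_succ_eq_map, List.map_cons, List.map_map, List.append_assoc,
        List.singleton_append]
      congr 1
      congr 1
      · simp
      · apply List.map_congr_left
        intro j _
        simp only [Function.comp]
        rw [List.take_succ_cons, List.sum_cons]
        ring
    · rw [List.sum_cons]; ring

lemma pvPref_eq (A : List Int) :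
    (A.foldl (fun (st : List Int × Int) x => (st.1 ++ [st.2 + x], st.2 + x)) ([0], 0)).1
      = pvColList A 0 := by
  rw [pvPrefFold]
  unfold pvColList
  rw [List.range_succ_eq_map, List.map_cons, List.map_map, List.singleton_append]
  refine List.cons_eq_cons.mpr ⟨by simp [pvRefC, pvP], ?_⟩
  apply List.map_congr_left
  intro j _
  simp [pvRefC, pvP, Function.comp]

lemma pvColList_read (A : List Int) (t p : Nat) (hp : p ≤ A.length) :
    PySem.List.pyGetD (pvColList A t) ↑p 0 = pvRefC A t p := by
  unfold pvColList
  rw [PySem.List.pyGetD_natCast]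
  exact PySem.List.getD_map_range _ _ _ _ (by omega)

lemma pvAltInnerFold (A pref : List Int) (hA : A ≠ [])
    (hpref : ∀ p, p ≤ A.length → PySem.List.pyGetD pref ↑p 0 = pvP A p) (t : Nat) :
    ∀ d : Nat, 1 ≤ d → d ≤ A.length →
      (PySem.List.pyRange 2 ((d : Int) + 1) 1).foldl (pvAltInner pref (pvColList A t))
          ([0] ++ PySem.List.slice A none (some 1))
        = (List.range (d + 1)).map (pvRefC A (t + 1)) := by
  intro d
  induction d with
  | zero => intro h _; omega
  | succ d ih =>
    intro _ hdn
    by_cases hd0 : d = 0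
    · subst hd0
      rw [show ((1 : Nat) : Int) + 1 = 2 from by norm_num, PySem.List.pyRange_one_eq_nil le_rfl,
        List.foldl_nil, show (1 : Int) = ((1 : Nat) : Int) from by norm_num,
        PySem.List.slice_to_natCast]
      cases A with
      | nil => exact absurd rfl hA
      | cons a as => simp [List.range_succ, pvRefC, pvP]
    · have hd1 : 1 ≤ d := by omega
      have ih' := ih hd1 (by omega)
      have hsucc : ((d + 1 : Nat) : Int) + 1 = (((d : Nat) : Int) + 1) + 1 := by push_cast; ring
      rw [hsucc, PySem.List.pyRange_one_succ_right (by omega), List.foldl_append, List.foldl_cons,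
        List.foldl_nil, ih']
      simp only [pvAltInner]
      have hdc : ((d : Int) + 1) = ((d + 1 : Nat) : Int) := by push_cast; ring
      have hcol : ∀ p, 1 ≤ p → p ≤ A.length →
          PySem.List.pyGetD (pvColList A t) ↑p 0 = pvRefC A t p :=
        fun p _ hp => pvColList_read A t p hp
      rw [hdc, pvBestFoldB A (pvRefC A t) pref (pvColList A t) hpref hcol (d + 1) (by omega)
        (by omega)]
      rw [List.range_succ (n := d + 1), List.map_append]
      congr 1
      simp only [List.map_cons, List.map_nil]
      congr 1
      simp only [pvRefC]
      rw [if_neg (by omega), if_neg (by omega)]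

lemma pvAltRounds (A pref : List Int) (hA : A ≠ [])
    (hpref : ∀ p, p ≤ A.length → PySem.List.pyGetD pref ↑p 0 = pvP A p)
    (l : List Int) :
    ∀ t : Nat, l.foldl (pvAltRound A pref) (pvColList A t) = pvColList A (t + l.length) := by
  intro t
  induction l generalizing t with
  | nil => simp
  | cons x xs ih =>
    simp only [List.foldl_cons, List.length_cons]
    have hn1 : 1 ≤ A.length := List.length_pos_of_ne_nil hA
    have hstep : pvAltRound A pref (pvColList A t) x = pvColList A (t + 1) := by
      unfold pvAltRound
      rw [pvAltInnerFold A pref hA hpref t A.length hn1 le_rfl]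
      rfl
    rw [hstep, ih (t + 1)]
    congr 1
    omega

lemma pvAlt_eq (A : List Int) (k : Int) (hA : A ≠ []) (hk : 1 ≤ k) :
    maximin_alt A k = pvRefC A (k.toNat - 1) A.length := by
  lift k to Nat using (by omega : (0 : Int) ≤ k) with K hK
  have hK1 : 1 ≤ K := by omega
  simp only [maximin_alt]
  rw [if_neg (by omega), pvPref_eq]
  have hpref : ∀ p, p ≤ A.length → PySem.List.pyGetD (pvColList A 0) ↑p 0 = pvP A p := by
    intro p hp
    rw [pvColList_read A 0 p hp]
    simp [pvRefC]
  rw [pvAltRounds A (pvColList A 0) hA hpref _ 0, pvColList_read A _ A.length le_rfl]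
  congr 1
  rw [PySem.List.length_pyRange_one]
  omega

lemma pvA_eq (A : List Int) (k : Int) (hA : A ≠ []) (hk : 1 ≤ k) :
    maximin A k = pvRefC A (k.toNat - 1) A.length := by
  lift k to Nat using (by omega : (0 : Int) ≤ k) with K hK
  have hK1 : 1 ≤ K := by omega
  have hn1 : 1 ≤ A.length := List.length_pos_of_ne_nil hA
  simp only [maximin]
  have e1 : (((A.length : Int)) + 1).toNat = A.length + 1 := by omega
  have e2 : (((K : Nat) : Int) + 1).toNat = K + 1 := by omega
  rw [e1, e2]
  obtain ⟨hs1, hc1⟩ := pvStage1 A A.length K hn1 K le_rfl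
  obtain ⟨hs2, hc2⟩ := pvStage2 A A.length K hn1 hK1 _ hs1 hc1 A.length le_rfl
  have hcol1 : pvColOK A A.length K
      ((PySem.List.pyRange 1 ((A.length : Int) + 1) 1).foldl (pvCol1Body A)
        ((PySem.List.pyRange 1 ((K : Int) + 1) 1).foldl (pvRow1Body A)
          (List.replicate (A.length + 1) (List.replicate (K + 1) 0)))) 1 := by
    intro j i hj hi1 hiK
    rw [hc2 j i]
    by_cases hi : i = 1
    · subst hi
      rw [if_pos (le_refl 1)]
      by_cases hj1 : 1 ≤ j
      · rw [if_pos ⟨rfl, hj1, hj⟩]; simp [pvRefC]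
      · have hj0 : j = 0 := by omega
        subst hj0
        rw [if_neg (by omega), if_neg (by omega)]
        simp [pvRefC, pvP]
    · rw [if_neg (show ¬(i = 1 ∧ 1 ≤ j ∧ j ≤ A.length) from by omega),
        if_neg (show ¬ i ≤ 1 from by omega), pvHead_eq A hA]
      unfold pvT2
      rw [if_neg (show ¬(i = 1 ∧ 1 ≤ j ∧ j ≤ A.length) from by omega)]
  obtain ⟨hs3, hcol⟩ := pvStage3 A A.length K rfl hn1 _ hs2 hcol1 K hK1 le_rfl
  have hfin := hcol A.length K le_rfl hK1 le_rfl
  rw [if_pos le_rfl] at hfin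
  rw [show pvGetA2 _ ((A.length : Nat) : Int) ((K : Nat) : Int) = pvG _ A.length K from
    pvGetA2_cast _ A.length K]
  exact hfin

-- ===== VERDICT (by name: the statement is the Claim_ definition above) =====
theorem maximin_spec : Claim_equal_maximin := by
  intro A k _hdom hpre
  unfold Spec_maximin
  rcases hpre with ⟨hk, hA⟩ | ⟨hk, hA⟩
  · rw [pvA_eq A k hA hk, pvAlt_eq A k hA hk]
  · subst hk; subst hA; decide
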